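-- pv_equiv track=rewrite | github.com/codesubhash234/calculator | calculator.py | lenlef
-- ===== SOURCE A (Python) =====
-- def lenlef(t):
--     leni = 0
--     for i in t[::-1]:
--         if i not in['*','/','-','+']:
--             leni+=1
--         else:
--             return leni
--     return leni
-- ===== SOURCE B (Python) =====
-- def lenlef(t):
--     idx = max(t.rfind(c) for c in '+-*/')
--     return len(t) - 1 - idx
-- ===== Notes on version B (the rewrite author's own statement) =====
-- stated objective: faster
-- what changed: Replaces the explicit reversed per-char counting loop by a closed form: compute the position of the last operator as max of str.rfind for each operator and return len(t) - 1 - that.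
import Mathlib
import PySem

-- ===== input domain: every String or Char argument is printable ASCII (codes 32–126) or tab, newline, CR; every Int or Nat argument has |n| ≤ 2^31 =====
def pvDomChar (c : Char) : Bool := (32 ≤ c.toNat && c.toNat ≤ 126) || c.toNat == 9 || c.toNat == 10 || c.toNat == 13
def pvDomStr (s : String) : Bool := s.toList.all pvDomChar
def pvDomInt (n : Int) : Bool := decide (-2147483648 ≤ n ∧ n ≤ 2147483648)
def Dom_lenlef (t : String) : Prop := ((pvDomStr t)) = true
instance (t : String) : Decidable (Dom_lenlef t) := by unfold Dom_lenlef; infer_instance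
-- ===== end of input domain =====

-- B replaces A's reversed-scan counting loop by a closed form from the last operator position
-- (len(t) - 1 - max of the four rfinds); objective: faster (constant-factor: C-level rfind scans replace a Python-level per-char loop, measured).


-- ===== PORT A =====
-- the 'for i in t[::-1]' loop with accumulator leni; an operator char returns leni early
def lenlefLoop : List Char → Int → Int
  | [], leni => leni
  | i :: rest, leni =>
    if ¬ (i = '*' ∨ i = '/' ∨ i = '-' ∨ i = '+') then lenlefLoop rest (leni + 1)
    else leni

def lenlef (t : String) : Int :=
  lenlefLoop ((PySem.Str.slice? t none none (-1)).getD "").toList 0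

-- ===== PORT B =====
-- str.rfind(c) for a single character: last index of c, -1 if absent (hand port; exact on all inputs)
def rfindAux : List Char → Char → Int → Int → Int
  | [], _, _, best => best
  | x :: xs, c, i, best => rfindAux xs c (i + 1) (if x = c then i else best)

def rfindChar (t : String) (c : Char) : Int := rfindAux t.toList c 0 (-1)

def lenlef_alt (t : String) : Int :=
  let idx := max (max (max (rfindChar t '+') (rfindChar t '-')) (rfindChar t '*')) (rfindChar t '/')
  (t.toList.length : Int) - 1 - idx

-- ===== PRECONDITION & SPEC =====
def Spec_lenlef (t : String) (out : Int) : Prop := out = lenlef_alt t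
instance (t : String) (out : Int) : Decidable (Spec_lenlef t out) := by unfold Spec_lenlef; infer_instance

-- ===== CLAIM (what is proved, stated in full; the proofs are below) =====
def Claim_equal_lenlef : Prop := ∀ (t : String), Dom_lenlef t → Spec_lenlef t (lenlef t)

-- ===== LEMMAS AND PROOFS =====

-- Bool form of A's loop condition (used only in the proofs)
def notOp (x : Char) : Bool := !(x == '*' || x == '/' || x == '-' || x == '+')

-- trailing non-c count, from the back of l
def twc (c : Char) (l : List Char) : Nat := (l.reverse.takeWhile (fun x => x ≠ c)).length

theorem rfindAux_append (l : List Char) (x c : Char) (i best : Int) :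
    rfindAux (l ++ [x]) c i best
      = if x = c then i + l.length else rfindAux l c i best := by
  induction l generalizing i best with
  | nil => by_cases hx : x = c <;> simp [rfindAux, hx]
  | cons y ys ih =>
    simp only [List.cons_append, rfindAux, ih]
    by_cases hx : x = c
    · simp only [hx, List.length_cons]
      push_cast; ring
    · simp [hx]

theorem rfindChar_eq (c : Char) (l : List Char) :
    rfindAux l c 0 (-1) = (l.length : Int) - 1 - twc c l := by
  induction l using List.reverseRecOn with
  | nil => simp [rfindAux, twc]
  | append_singleton l x ih =>
    rw [rfindAux_append, ih]
    by_cases h : x = c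
    · simp [h, twc]
    · simp [twc, fun hc => h hc]
      omega

theorem lenlefLoop_eq (l : List Char) (acc : Int) :
    lenlefLoop l acc = acc + ((l.takeWhile notOp).length : Int) := by
  induction l generalizing acc with
  | nil => simp [lenlefLoop]
  | cons x xs ih =>
    by_cases h : x = '*' ∨ x = '/' ∨ x = '-' ∨ x = '+'
    · have hb : notOp x = false := by
        rcases h with h | h | h | h <;> simp [notOp, h]
      simp [lenlefLoop, h, List.takeWhile, hb]
    · push Not at h
      obtain ⟨h1, h2, h3, h4⟩ := h
      have hb : notOp x = true := by simp [notOp, h1, h2, h3, h4]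
      simp [lenlefLoop, h1, h2, h3, h4, List.takeWhile, hb, ih]
      ring

theorem takeWhile_min (r : List Char) :
    (((r.takeWhile notOp).length : Int))
      = min (min (min ((r.takeWhile (fun x => x ≠ '+')).length : Int)
                     ((r.takeWhile (fun x => x ≠ '-')).length : Int))
                 ((r.takeWhile (fun x => x ≠ '*')).length : Int))
             ((r.takeWhile (fun x => x ≠ '/')).length : Int) := by
  induction r with
  | nil => simp
  | cons x xs ih =>
    by_cases h : x = '*' ∨ x = '/' ∨ x = '-' ∨ x = '+'
    · have hb : notOp x = false := by
        rcases h with h | h | h | h <;> simp [notOp, h]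
      rcases h with h | h | h | h <;> subst h <;>
        simp [List.takeWhile, hb] <;> omega
    · push Not at h
      obtain ⟨h1, h2, h3, h4⟩ := h
      have hb : notOp x = true := by simp [notOp, h1, h2, h3, h4]
      simp [List.takeWhile, hb, h1, h2, h3, h4, ih]

-- ===== VERDICT (by name: the statement is the Claim_ definition above) =====
theorem lenlef_spec : Claim_equal_lenlef := by
  intro t _
  unfold Spec_lenlef
  have ha : lenlef t = lenlefLoop t.toList.reverse 0 := by
    rw [lenlef, PySem.Str.slice?_none_none_neg_one, Option.getD_some]
    simp
  have hb : lenlef_alt t = (t.toList.length : Int) - 1 -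
      max (max (max (rfindChar t '+') (rfindChar t '-')) (rfindChar t '*')) (rfindChar t '/') := rfl
  rw [ha, hb, lenlefLoop_eq, zero_add]
  simp only [rfindChar, rfindChar_eq]
  rw [show ∀ (a b c d n : Int),
        n - 1 - max (max (max (n - 1 - a) (n - 1 - b)) (n - 1 - c)) (n - 1 - d)
          = min (min (min a b) c) d from fun a b c d n => by omega]
  simpa [twc] using takeWhile_min t.toList.reverse
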